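-- pv_equiv track=rewrite | github.com/yehorn0/algorithm_physics_2024_2 | 4/nf24/src/lab_2.py | weights_equilibrium
-- ===== SOURCE A (Python) =====
-- def weights_equilibrium(weights: list[int]) -> int:
--     for current_index in range(len(weights)):
--         left = 0
--         for idx, weight in enumerate(weights[:current_index]):
--             left += weight * (current_index - idx)
--         # left = sum(
--         #     weight * (current_index - idx) for idx, weight in enumerate(weights[:current_index])
--         # )
--         right = sum(
--             weight * (idx + 1) for idx, weight in enumerate(weights[current_index + 1:])
--         )
--         if left == right:
--             return current_index
--     return -1
-- ===== SOURCE B (Python) =====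
-- def weights_equilibrium(weights: list[int]) -> int:
--     # One pass: maintain prefix sum, suffix sum, and both torques incrementally.
--     left = 0
--     right = sum(w * i for i, w in enumerate(weights))
--     pre = 0
--     suf = sum(weights)
--     for i, w in enumerate(weights):
--         if left == right:
--             return i
--         pre += w
--         suf -= w
--         left += pre
--         right -= suf
--     return -1
-- ===== Notes on version B (the rewrite author's own statement) =====
-- stated objective: faster
-- what changed: Replaced A's per-index full rescans of both sides (quadratic) with a single pass that updates prefix/suffix weight sums and both torques incrementally in O(1) per index.
import Mathlib
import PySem

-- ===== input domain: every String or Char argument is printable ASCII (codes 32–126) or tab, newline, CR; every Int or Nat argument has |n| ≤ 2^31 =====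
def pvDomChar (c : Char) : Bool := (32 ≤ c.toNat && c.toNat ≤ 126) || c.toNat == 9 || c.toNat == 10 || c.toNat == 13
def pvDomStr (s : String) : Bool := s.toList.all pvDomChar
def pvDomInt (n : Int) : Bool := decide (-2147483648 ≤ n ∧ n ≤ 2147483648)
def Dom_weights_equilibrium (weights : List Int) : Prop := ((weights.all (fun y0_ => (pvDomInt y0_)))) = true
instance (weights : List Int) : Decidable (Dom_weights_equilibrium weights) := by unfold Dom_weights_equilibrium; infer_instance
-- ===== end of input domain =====

-- B replaces A's O(n^2) rescan of both sides at every index by a single pass that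
-- updates prefix/suffix sums and both torques incrementally (objective: faster, asymptotic).

-- ===== PORT A =====
-- left accumulator loop over enumerate(weights[:current_index])
def pvALeft (weights : List Int) (ci : Nat) : Int :=
  (weights.take ci).zipIdx.foldl (fun acc p => acc + p.1 * ((ci : Int) - (p.2 : Int))) 0

-- right = sum(weight*(idx+1) for idx, weight in enumerate(weights[current_index+1:]))
def pvARight (weights : List Int) (ci : Nat) : Int :=
  ((weights.drop (ci + 1)).zipIdx.map (fun p => p.1 * ((p.2 : Int) + 1))).sum

-- the 'for current_index in range(len(weights))' loop with an early return
def pvALoop (weights : List Int) (ci : Nat) : Int :=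
  if ci < weights.length then
    if pvALeft weights ci = pvARight weights ci then (ci : Int)
    else pvALoop weights (ci + 1)
  else -1
termination_by weights.length - ci

def weights_equilibrium (weights : List Int) : Int := pvALoop weights 0

-- ===== PORT B =====
-- B's for-loop: state (i, left, right, pre, suf), early return on balance
def pvBLoop (ws : List Int) (i left right pre suf : Int) : Int :=
  match ws with
  | [] => -1
  | w :: rest =>
    if left = right then i
    else pvBLoop rest (i + 1) (left + (pre + w)) (right - (suf - w)) (pre + w) (suf - w)

def weights_equilibrium_alt (weights : List Int) : Int :=
  pvBLoop weights 0 0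
    (weights.zipIdx.foldl (fun acc p => acc + p.1 * (p.2 : Int)) 0)  -- sum(w*i for i,w in enumerate(weights))
    0 weights.sum

-- ===== PRECONDITION & SPEC =====
def Spec_weights_equilibrium (weights : List Int) (out : Int) : Prop := out = weights_equilibrium_alt weights
instance (weights : List Int) (out : Int) : Decidable (Spec_weights_equilibrium weights out) := by unfold Spec_weights_equilibrium; infer_instance

-- ===== CLAIM (what is proved, stated in full; the proofs are below) =====
def Claim_equal_weights_equilibrium : Prop := ∀ (weights : List Int), Dom_weights_equilibrium weights → Spec_weights_equilibrium weights (weights_equilibrium weights)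

-- ===== LEMMAS AND PROOFS =====

-- torque with increasing coefficients c, c+1, …
def pvTorqueUp (l : List Int) (c : Int) : Int :=
  match l with
  | [] => 0
  | x :: xs => x * c + pvTorqueUp xs (c + 1)

-- torque with decreasing coefficients c, c-1, …
def pvTorqueDown (l : List Int) (c : Int) : Int :=
  match l with
  | [] => 0
  | x :: xs => x * c + pvTorqueDown xs (c - 1)

lemma torqueUp_succ (l : List Int) (c : Int) : pvTorqueUp l (c + 1) = pvTorqueUp l c + l.sum := by
  induction l generalizing c with
  | nil => simp [pvTorqueUp]
  | cons x xs ih =>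
    simp only [pvTorqueUp, List.sum_cons]
    rw [ih (c + 1)]
    ring

lemma torqueDown_succ (l : List Int) (c : Int) : pvTorqueDown l (c + 1) = pvTorqueDown l c + l.sum := by
  induction l generalizing c with
  | nil => simp [pvTorqueDown]
  | cons x xs ih =>
    simp only [pvTorqueDown, List.sum_cons]
    have h1 : pvTorqueDown xs c = pvTorqueDown xs (c - 1) + xs.sum := by
      have := ih (c - 1)
      rw [show c - 1 + 1 = c by ring] at this
      exact this
    rw [show c + 1 - 1 = c by ring, h1]
    ring

lemma torqueDown_append (l : List Int) (w c : Int) :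
    pvTorqueDown (l ++ [w]) c = pvTorqueDown l c + w * (c - l.length) := by
  induction l generalizing c with
  | nil => simp [pvTorqueDown]
  | cons x xs ih =>
    simp only [List.cons_append, pvTorqueDown, List.length_cons, ih (c - 1)]
    push_cast
    ring

lemma foldl_zipIdx_down (l : List Int) (n : Nat) (c acc : Int) :
    (l.zipIdx n).foldl (fun a p => a + p.1 * (c - (p.2 : Int))) acc = acc + pvTorqueDown l (c - n) := by
  induction l generalizing n acc with
  | nil => simp [pvTorqueDown]
  | cons x xs ih =>
    rw [List.zipIdx_cons, List.foldl_cons, ih (n + 1)]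
    simp only [pvTorqueDown]
    rw [show c - ((n + 1 : Nat) : Int) = c - n - 1 by push_cast; ring]
    ring

lemma map_sum_zipIdx_up (l : List Int) (n : Nat) :
    ((l.zipIdx n).map (fun p => p.1 * ((p.2 : Int) + 1))).sum = pvTorqueUp l ((n : Int) + 1) := by
  induction l generalizing n with
  | nil => simp [pvTorqueUp]
  | cons x xs ih =>
    rw [List.zipIdx_cons, List.map_cons, List.sum_cons, ih (n + 1)]
    simp only [pvTorqueUp]
    rw [show (((n + 1 : Nat) : Int) + 1) = (n : Int) + 1 + 1 by push_cast; ring]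

lemma foldl_zipIdx_idx (l : List Int) (n : Nat) (acc : Int) :
    (l.zipIdx n).foldl (fun a p => a + p.1 * (p.2 : Int)) acc = acc + pvTorqueUp l n := by
  induction l generalizing n acc with
  | nil => simp [pvTorqueUp]
  | cons x xs ih =>
    rw [List.zipIdx_cons, List.foldl_cons, ih (n + 1)]
    simp only [pvTorqueUp]
    rw [show (((n + 1 : Nat)) : Int) = (n : Int) + 1 by push_cast; ring]
    ring

lemma aLeft_eq (ws : List Int) (ci : Nat) :
    pvALeft ws ci = pvTorqueDown (ws.take ci) ci := by
  unfold pvALeft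
  rw [foldl_zipIdx_down]
  simp

lemma aRight_eq (ws : List Int) (ci : Nat) :
    pvARight ws ci = pvTorqueUp (ws.drop (ci + 1)) 1 := by
  unfold pvARight
  rw [map_sum_zipIdx_up]
  simp

lemma take_succ_eq (ws : List Int) (ci : Nat) (h : ci < ws.length) :
    ws.take (ci + 1) = ws.take ci ++ [ws[ci]] := by
  rw [List.take_add_one, List.getElem?_eq_getElem h]
  rfl

lemma aLeft_step (ws : List Int) (ci : Nat) (h : ci < ws.length) :
    pvALeft ws (ci + 1) = pvALeft ws ci + (ws.take (ci + 1)).sum := by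
  rw [aLeft_eq, aLeft_eq, take_succ_eq ws ci h, torqueDown_append]
  have hl : ((ws.take ci).length : Int) = (ci : Int) := by
    simp [Nat.le_of_lt h]
  rw [hl, List.sum_append, List.sum_cons, List.sum_nil]
  rw [show ((ci + 1 : Nat) : Int) = (ci : Int) + 1 by push_cast; ring, torqueDown_succ]
  ring

lemma aRight_step (ws : List Int) (ci : Nat) :
    pvARight ws ci = pvARight ws (ci + 1) + (ws.drop (ci + 1)).sum := by
  rw [aRight_eq, aRight_eq]
  have h2 : ws.drop (ci + 2) = (ws.drop (ci + 1)).drop 1 := by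
    rw [List.drop_drop]
  rcases hd : ws.drop (ci + 1) with _ | ⟨w, tl⟩
  · rw [h2, hd]
    simp [pvTorqueUp]
  · rw [h2, hd]
    simp only [List.drop_one, List.tail_cons, pvTorqueUp, List.sum_cons]
    rw [show (1 : Int) + 1 = 2 by ring, show (2 : Int) = 1 + 1 by ring, torqueUp_succ]
    ring

lemma main_loop (k ci : Nat) (ws : List Int) (hk : ws.length = ci + k) :
    pvBLoop (ws.drop ci) ci (pvALeft ws ci) (pvARight ws ci) ((ws.take ci).sum) ((ws.drop ci).sum)
      = pvALoop ws ci := by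
  induction k generalizing ci with
  | zero =>
    have hd : ws.drop ci = [] := by
      apply List.drop_eq_nil_of_le; omega
    rw [hd, pvALoop]
    simp [pvBLoop]
    omega
  | succ k ih =>
    have hlt : ci < ws.length := by omega
    have hd : ws.drop ci = ws[ci] :: ws.drop (ci + 1) := List.drop_eq_getElem_cons hlt
    rw [hd, pvBLoop, pvALoop, if_pos hlt]
    by_cases hc : pvALeft ws ci = pvARight ws ci
    · simp [hc]
    · rw [if_neg hc, if_neg hc]
      have hpre : (ws.take ci).sum + ws[ci] = (ws.take (ci + 1)).sum := by
        rw [take_succ_eq ws ci hlt, List.sum_append, List.sum_cons, List.sum_nil]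
        ring
      have hsuf : (ws[ci] :: ws.drop (ci + 1)).sum - ws[ci] = (ws.drop (ci + 1)).sum := by
        rw [List.sum_cons]; ring
      rw [hsuf, hpre]
      have hL : pvALeft ws ci + (ws.take (ci + 1)).sum = pvALeft ws (ci + 1) :=
        (aLeft_step ws ci hlt).symm
      have hR : pvARight ws ci - (ws.drop (ci + 1)).sum = pvARight ws (ci + 1) := by
        rw [aRight_step ws ci]; ring
      rw [hL, hR]
      have hih := ih (ci + 1) (by omega)
      push_cast at hih
      exact hih

lemma a_eq_b (ws : List Int) : weights_equilibrium ws = weights_equilibrium_alt ws := by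
  unfold weights_equilibrium weights_equilibrium_alt
  have hleft : pvALeft ws 0 = 0 := by
    rw [aLeft_eq]; simp [pvTorqueDown]
  have hinit : ws.zipIdx.foldl (fun acc p => acc + p.1 * (p.2 : Int)) 0 = pvARight ws 0 := by
    rw [foldl_zipIdx_idx, aRight_eq]
    rcases ws with _ | ⟨w, tl⟩
    · simp [pvTorqueUp]
    · simp [pvTorqueUp]
  have h0 := main_loop ws.length 0 ws (by omega)
  simp only [List.drop_zero, List.take_zero, List.sum_nil, Nat.cast_zero, hleft] at h0
  rw [hinit, ← h0]

-- ===== VERDICT (by name: the statement is the Claim_ definition above) =====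
theorem weights_equilibrium_spec : Claim_equal_weights_equilibrium := by
  intro ws _
  unfold Spec_weights_equilibrium
  exact a_eq_b ws
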